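-- pv_equiv track=rewrite | github.com/Hacker-rep/CashApp-Money-Hack | cashapp.py | findMentions
-- ===== SOURCE A (Python) =====
-- def findMentions(tweet):
--     # Start found at false
--     atFound = False
--     # Create mentions string
--     usernames = ""
--     # Iterate through each character
--     for letter in tweet:
--         # If at sign found, then it's a user mention
--         if letter == "@":
--             atFound = True
--         # If a space if found, then it's the end of the mention
--         if letter.isspace():
--             atFound = False
--         # If none above is true, then add the letter to the username
--         elif atFound:
--             usernames += letter
--     # Hacky, but add space in front of @, then remove trailing whitespace and return
--     final = (usernames.replace("@", " @")).strip()
--     # Remove unwanted characters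
--     unwanted = [',','.',':',';','!','?','(',')','[',']','{','}','<','>','+','=','*','&','%','$','#','^','~','`','|','\\','\'','"']
--     for char in unwanted:
--         final = final.replace(char, '')
--     return final
-- ===== SOURCE B (Python) =====
-- def findMentions(tweet):
--     # Tokenize on whitespace and take each word from its first '@' (if any),
--     # instead of A's char-by-char state machine.
--     parts = []
--     for word in tweet.split():
--         idx = word.find('@')
--         if idx != -1:
--             parts.append(word[idx:])
--     final = ''.join(parts).replace('@', ' @').strip()
--     unwanted = [',','.',':',';','!','?','(',')','[',']','{','}','<','>','+','=','*','&','%','$','#','^','~','`','|','\\','\'','"']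
--     for char in unwanted:
--         final = final.replace(char, '')
--     return final
-- ===== Notes on version B (the rewrite author's own statement) =====
-- stated objective: faster
-- what changed: Replaces the character-by-character atFound state machine (with per-character string concatenation) by tokenize-then-extract: split the tweet on whitespace, take each word from its first at-sign, and join the pieces; post-processing unchanged.
import Mathlib
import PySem

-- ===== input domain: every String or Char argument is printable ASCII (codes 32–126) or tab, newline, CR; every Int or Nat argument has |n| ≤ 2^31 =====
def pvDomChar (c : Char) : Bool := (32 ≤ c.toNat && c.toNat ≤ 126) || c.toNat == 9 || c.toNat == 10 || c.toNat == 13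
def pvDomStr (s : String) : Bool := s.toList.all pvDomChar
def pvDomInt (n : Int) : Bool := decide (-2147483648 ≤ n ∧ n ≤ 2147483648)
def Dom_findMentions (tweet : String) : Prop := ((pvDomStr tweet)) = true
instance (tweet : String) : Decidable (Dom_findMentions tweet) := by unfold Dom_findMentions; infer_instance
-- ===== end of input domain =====

-- B (measured faster in a timing run) replaces A's char-by-char `atFound` state machine with tokenize-then-extract
-- (split on whitespace, take each word from its first '@'); same post-processing.

-- shared by both ports: the identical post-processing lines of both Pythons
-- (replace '@' by ' @', strip, delete the unwanted characters)
def pvUnwanted : List Char :=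
  [',', '.', ':', ';', '!', '?', '(', ')', '[', ']', '{', '}', '<', '>', '+', '=',
   '*', '&', '%', '$', '#', '^', '~', '`', '|', '\\', '\'', '"']

def pvCleanup (usernames : List Char) : String :=
  let final := PySem.Chars.strip (PySem.Chars.replace usernames ['@'] [' ', '@'])
  String.ofList (pvUnwanted.foldl (fun f c => PySem.Chars.replace f [c] []) final)

-- ===== PORT A =====
-- A's loop body: if letter == '@': atFound = True; if letter.isspace(): atFound = False
-- elif atFound: usernames += letter   (str concatenation ported as List Char append)
def findMentionsStep (st : Bool × List Char) (letter : Char) : Bool × List Char :=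
  let atFound := if letter = '@' then true else st.1
  if PySem.Chars.isspace letter then (false, st.2)
  else if atFound then (atFound, st.2 ++ [letter])
  else (atFound, st.2)

def findMentions (tweet : String) : String :=
  let usernames := (tweet.toList.foldl findMentionsStep (false, [])).2
  pvCleanup usernames

-- ===== PORT B =====
-- B's loop body: idx = word.find('@'); if idx != -1: parts.append(word[idx:]);
-- word[idx:] with 0 ≤ idx ≤ len word (guaranteed by idx ≠ -1) is exactly List.drop idx.toNat;
-- ''.join(parts) is PySem.Chars.join []
def findMentions_alt (tweet : String) : String :=
  let parts := (PySem.Chars.split₀ tweet.toList).foldl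
    (fun parts word =>
      let idx := PySem.Chars.find word ['@']
      if idx ≠ -1 then parts ++ [word.drop idx.toNat] else parts) []
  pvCleanup (PySem.Chars.join [] parts)

-- ===== PRECONDITION & SPEC =====
def Spec_findMentions (tweet : String) (out : String) : Prop := out = findMentions_alt tweet
instance (tweet : String) (out : String) : Decidable (Spec_findMentions tweet out) := by unfold Spec_findMentions; infer_instance

-- ===== CLAIM (what is proved, stated in full; the proofs are below) =====
def Claim_equal_findMentions : Prop := ∀ (tweet : String), Dom_findMentions tweet → Spec_findMentions tweet (findMentions tweet)

-- ===== LEMMAS AND PROOFS =====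

-- the suffix of a word starting at its first '@' (empty if there is none)
def pvFromAt : List Char → List Char
  | [] => []
  | c :: t => if c = '@' then c :: t else pvFromAt t

lemma pvFindGo_shape (w : List Char) (k : ℕ) :
    PySem.Chars.find.go ['@'] w k = -1 ∨ ∃ j : ℕ, PySem.Chars.find.go ['@'] w k = (k : ℤ) + j := by
  induction w generalizing k with
  | nil => simp [PySem.Chars.find.go]
  | cons c t ih =>
    simp only [PySem.Chars.find.go]
    split_ifs
    · exact Or.inr ⟨0, by simp⟩
    · rcases ih (k + 1) with h | ⟨j, hj⟩
      · exact Or.inl h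
      · exact Or.inr ⟨j + 1, by rw [hj]; push_cast; ring⟩

lemma pvFindGo_fromAt (w : List Char) (k : ℕ) :
    (if PySem.Chars.find.go ['@'] w k ≠ -1
      then w.drop ((PySem.Chars.find.go ['@'] w k).toNat - k) else []) = pvFromAt w := by
  induction w generalizing k with
  | nil => simp [PySem.Chars.find.go, pvFromAt]
  | cons c t ih =>
    by_cases hc : c = '@'
    · subst hc
      simp [PySem.Chars.find.go, List.isPrefixOf, pvFromAt]
    · have hpre : (List.isPrefixOf ['@'] (c :: t)) = false := by
        simp [List.isPrefixOf]
        exact fun h => absurd h.symm hc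
      simp only [PySem.Chars.find.go, hpre, Bool.false_eq_true, if_false, pvFromAt, hc]
      rcases pvFindGo_shape t (k + 1) with h | ⟨j, hj⟩
      · rw [h]; rw [← ih (k + 1), h]; simp
      · rw [hj]
        have h1 : ((k : ℤ) + 1 + j ≠ -1) := by omega
        have h2 : ((k : ℤ) + 1 + j).toNat - k = j + 1 := by omega
        have h3 : ((k : ℤ) + 1 + j).toNat - (k + 1) = j := by omega
        rw [← ih (k + 1), hj]
        simp [h1, h2, h3]

lemma pvE_eq_fromAt (w : List Char) :
    (if PySem.Chars.find w ['@'] ≠ -1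
      then w.drop (PySem.Chars.find w ['@']).toNat else []) = pvFromAt w := by
  have := pvFindGo_fromAt w 0
  simpa [PySem.Chars.find] using this

lemma pvFromAt_append (p : List Char) (c : Char) :
    pvFromAt (p ++ [c])
      = pvFromAt p ++ (if c = '@' then [c] else if p.contains '@' then [c] else []) := by
  induction p with
  | nil => by_cases hc : c = '@' <;> simp [pvFromAt, hc]
  | cons a q ih =>
    by_cases ha : a = '@'
    · subst ha
      by_cases hc : c = '@' <;> simp [pvFromAt, hc]
    · have h1 : ('@' = a) = False := by simp [eq_comm, ha]
      simp [pvFromAt, ha, ih, h1]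

lemma pvFoldl_acc (cs : List Char) (f : Bool) (acc : List Char) :
    cs.foldl findMentionsStep (f, acc)
      = ((cs.foldl findMentionsStep (f, [])).1, acc ++ (cs.foldl findMentionsStep (f, [])).2) := by
  induction cs generalizing f acc with
  | nil => simp
  | cons c t ih =>
    simp only [List.foldl_cons, findMentionsStep]
    split_ifs <;> rw [ih] <;> conv_rhs => rw [ih]
    all_goals simp

lemma pvSplitGo_acc (cs cur : List Char) (acc : List (List Char)) :
    PySem.Chars.split₀.go cs cur acc = acc.reverse ++ PySem.Chars.split₀.go cs cur [] := by
  induction cs generalizing cur acc with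
  | nil => simp only [PySem.Chars.split₀.go]; split_ifs <;> simp
  | cons c t ih =>
    simp only [PySem.Chars.split₀.go]
    split_ifs <;> rw [ih] <;> conv_rhs => rw [ih]
    all_goals simp

lemma pvMachine_split (cs : List Char) : ∀ p : List Char,
    pvFromAt p ++ (cs.foldl findMentionsStep (p.contains '@', [])).2
      = (PySem.Chars.split₀.go cs p.reverse []).flatMap pvFromAt := by
  induction cs with
  | nil =>
    intro p
    simp only [List.foldl_nil, PySem.Chars.split₀.go]
    by_cases hp : p = [] <;> simp [hp, pvFromAt]
  | cons c t ih =>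
    intro p
    by_cases hs : PySem.Chars.isspace c = true
    · simp only [List.foldl_cons, findMentionsStep, hs, if_true, PySem.Chars.split₀.go]
      by_cases hp : p = []
      · subst hp
        simpa using ih []
      · have hne : (p.reverse.isEmpty) = false := by
          simp [hp]
        simp only [hne, Bool.false_eq_true, if_false, List.reverse_reverse]
        rw [pvSplitGo_acc]
        have := ih []
        simp only [pvFromAt, List.contains_nil, List.nil_append] at this
        simp [this]
    · have hstep : findMentionsStep (p.contains '@', []) c
          = (if c = '@' then true else p.contains '@',
             if (if c = '@' then true else p.contains '@') then [c] else []) := by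
        simp only [findMentionsStep, hs, Bool.false_eq_true, if_false]
        split_ifs <;> simp_all
      have hsplit : PySem.Chars.split₀.go (c :: t) p.reverse []
          = PySem.Chars.split₀.go t (p ++ [c]).reverse [] := by
        simp only [PySem.Chars.split₀.go, hs, Bool.false_eq_true, if_false, List.reverse_append]
        rfl
      rw [hsplit, ← ih (p ++ [c])]
      simp only [List.foldl_cons, hstep]
      rw [pvFoldl_acc]
      have hcont : (p ++ [c]).contains '@' = (if c = '@' then true else p.contains '@') := by
        by_cases hc : c = '@'
        · simp [hc]
        · simp only [hc, if_false, List.contains_append]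
          simp
          exact fun h => absurd h.symm hc
      rw [pvFromAt_append, hcont]
      by_cases hc : c = '@' <;> simp [hc]

-- B's foldl builds exactly the flatMap of the per-word extraction
lemma pvPartsB (ws : List (List Char)) (acc : List (List Char)) :
    ws.foldl (fun parts word =>
      let idx := PySem.Chars.find word ['@']
      if idx ≠ -1 then parts ++ [word.drop idx.toNat] else parts) acc
    = acc ++ ws.flatMap (fun w =>
        if PySem.Chars.find w ['@'] ≠ -1 then [w.drop (PySem.Chars.find w ['@']).toNat] else []) := by
  induction ws generalizing acc with
  | nil => simp
  | cons w t ih =>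
    rw [List.foldl_cons, List.flatMap_cons, ih]
    by_cases h : PySem.Chars.find w ['@'] = -1 <;> simp [h]

lemma pvJoinNil (l : List (List Char)) : PySem.Chars.join [] l = l.flatten := by
  simp only [PySem.Chars.join, List.intercalate]
  induction l with
  | nil => simp
  | cons a t ih =>
    cases t with
    | nil => simp [List.intersperse]
    | cons b u => simp only [List.intersperse] at ih ⊢; simp_all
  
-- ===== VERDICT (by name: the statement is the Claim_ definition above) =====
lemma pvFlattenB (ws : List (List Char)) :
    (ws.flatMap (fun w =>
        if PySem.Chars.find w ['@'] ≠ -1 then [List.drop (PySem.Chars.find w ['@']).toNat w] else [])).flatten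
      = ws.flatMap pvFromAt := by
  induction ws with
  | nil => rfl
  | cons w t ih =>
    rw [List.flatMap_cons, List.flatMap_cons, List.flatten_append, ih, ← pvE_eq_fromAt w]
    by_cases h : PySem.Chars.find w ['@'] = -1 <;> simp [h]

theorem findMentions_spec : Claim_equal_findMentions := by
  intro tweet _
  show findMentions tweet = findMentions_alt tweet
  unfold findMentions findMentions_alt
  rw [pvPartsB]
  show pvCleanup ((List.foldl findMentionsStep (false, []) tweet.toList).2)
      = pvCleanup (PySem.Chars.join [] ([] ++ List.flatMap (fun w =>
          if PySem.Chars.find w ['@'] ≠ -1 then [List.drop (PySem.Chars.find w ['@']).toNat w] else [])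
          (PySem.Chars.split₀ tweet.toList)))
  rw [pvJoinNil, List.nil_append, pvFlattenB]
  congr 1
  have hmach := pvMachine_split tweet.toList []
  simp only [pvFromAt, List.nil_append, List.reverse_nil, List.contains_nil] at hmach
  exact hmach
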